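-- pv_equiv track=rewrite | github.com/Yumin-Hwang046/Team4_ImgGeneration_Project | backend/image_generator/image_gen.py | _trim_prompt
-- ===== SOURCE A (Python) =====
-- def _trim_prompt(prompt: str, max_tokens: int = 75) -> str:
--     """CLIP 77토큰 한계에 맞게 프롬프트를 단어 단위로 트리밍."""
--     words = prompt.split(", ")
--     result = []
--     total = 0
--     for word in words:
--         token_count = len(word.split()) + 1
--         if total + token_count > max_tokens:
--             break
--         result.append(word)
--         total += token_count
--     return ", ".join(result)
-- ===== SOURCE B (Python) =====
-- from itertools import accumulate
--
-- def _trim_prompt(prompt: str, max_tokens: int = 75) -> str: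
--     """Prefix-sum formulation: cumulative token totals, cutoff = longest prefix within the limit."""
--     words = prompt.split(", ")
--     cum = list(accumulate(len(w.split()) + 1 for w in words))
--     cutoff = sum(1 for t in cum if t <= max_tokens)
--     return ", ".join(words[:cutoff])
-- ===== Notes on version B (the rewrite author's own statement) =====
-- stated objective: alternative
-- what changed: Replaces the interleaved accumulate-and-break loop with a declarative pipeline: a cumulative prefix-sum of per-segment token counts, a count of prefix sums within the limit as the cutoff, and a slice-and-join.
import Mathlib
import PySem

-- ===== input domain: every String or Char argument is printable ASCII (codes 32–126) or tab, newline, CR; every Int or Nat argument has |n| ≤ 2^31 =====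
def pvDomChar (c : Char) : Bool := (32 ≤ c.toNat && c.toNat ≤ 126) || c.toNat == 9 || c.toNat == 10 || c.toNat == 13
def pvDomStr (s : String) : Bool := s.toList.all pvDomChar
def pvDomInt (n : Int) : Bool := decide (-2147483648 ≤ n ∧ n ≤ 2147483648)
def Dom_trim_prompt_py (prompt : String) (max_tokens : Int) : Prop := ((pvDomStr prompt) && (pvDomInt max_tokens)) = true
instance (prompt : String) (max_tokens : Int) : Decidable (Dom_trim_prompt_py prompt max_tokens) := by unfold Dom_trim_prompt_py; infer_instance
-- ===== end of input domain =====

-- B replaces A's interleaved accumulate-and-break loop by a prefix-sum pipeline (alternative decomposition, same cost).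

-- ===== PORT A =====
-- A's for-loop with break: accumulate words while the running token total stays within the limit.
-- s.split(", ") is ported as PySem.Str.split? with .getD [] (exact: the separator is nonempty, so split? is always some).
def trimLoopA : List String → Int → Int → List String
  | [], _, _ => []
  | w :: ws, total, mt =>
    let token_count : Int := ((PySem.Str.split₀ w).length : Int) + 1
    if total + token_count > mt then []
    else w :: trimLoopA ws (total + token_count) mt

def trim_prompt_py (prompt : String) (max_tokens : Int) : String :=
  PySem.Str.join ", " (trimLoopA ((PySem.Str.split? prompt ", ").getD []) 0 max_tokens)

-- ===== PORT B =====
-- Source B: cumulative prefix sums of per-segment token counts (itertools.accumulate as scanl-tail),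
-- cutoff = number of cumulative totals within the limit, then slice and join.
def trim_prompt_py_alt (prompt : String) (max_tokens : Int) : String :=
  let words := (PySem.Str.split? prompt ", ").getD []
  let cum := (List.scanl (· + ·) 0 (words.map (fun w => ((PySem.Str.split₀ w).length : Int) + 1))).tail
  let cutoff := cum.countP (fun t => decide (t ≤ max_tokens))
  PySem.Str.join ", " (List.take cutoff words)

-- ===== PRECONDITION & SPEC =====
def Spec_trim_prompt_py (prompt : String) (max_tokens : Int) (out : String) : Prop := out = trim_prompt_py_alt prompt max_tokens
instance (prompt : String) (max_tokens : Int) (out : String) : Decidable (Spec_trim_prompt_py prompt max_tokens out) := by unfold Spec_trim_prompt_py; infer_instance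

-- ===== CLAIM (what is proved, stated in full; the proofs are below) =====
def Claim_equal_trim_prompt_py : Prop := ∀ (prompt : String) (max_tokens : Int), Dom_trim_prompt_py prompt max_tokens → Spec_trim_prompt_py prompt max_tokens (trim_prompt_py prompt max_tokens)

-- ===== LEMMAS AND PROOFS =====

-- a scanl over integers is its start consed onto its tail
theorem pv_scanl_cons_self (s : Int) (cs : List Int) :
    List.scanl (· + ·) s cs = s :: (List.scanl (· + ·) s cs).tail := by
  conv_lhs => rw [← List.cons_head_tail (List.scanl_ne_nil)]
  rw [List.head_scanl]

-- every cumulative sum is at least the start when all summands are nonnegative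
theorem pv_scanl_lb (cs : List Int) (s : Int) (h0 : ∀ c ∈ cs, 0 ≤ c) :
    ∀ x ∈ List.scanl (· + ·) s cs, s ≤ x := by
  induction cs generalizing s with
  | nil => simp [List.scanl_nil]
  | cons c cs ih =>
    intro x hx
    simp only [List.scanl_cons, List.mem_cons] at hx
    rcases hx with rfl | hx
    · have := h0 c (by simp); omega
    · have := ih (s + c) (fun c' hc' => h0 c' (by simp [hc'])) x hx
      have := h0 c (by simp)
      omega

theorem pv_loop_eq_take (ws : List String) (total mt : Int) :
    trimLoopA ws total mt =
      List.take (((List.scanl (· + ·) total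
        (ws.map (fun w => ((PySem.Str.split₀ w).length : Int) + 1))).tail).countP
          (fun t => decide (t ≤ mt))) ws := by
  induction ws generalizing total with
  | nil => simp [trimLoopA, List.scanl_nil]
  | cons w ws ih =>
    have htok : (1 : Int) ≤ ((PySem.Str.split₀ w).length : Int) + 1 := by
      have : (0 : Int) ≤ ((PySem.Str.split₀ w).length : Int) := Int.natCast_nonneg _
      omega
    simp only [trimLoopA, List.map_cons, List.scanl_cons, List.tail_cons]
    set t1 : Int := total + (((PySem.Str.split₀ w).length : Int) + 1) with ht1
    by_cases hgt : t1 > mt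
    · have hz : (List.scanl (· + ·) t1
          (ws.map (fun w => ((PySem.Str.split₀ w).length : Int) + 1))).countP
            (fun t => decide (t ≤ mt)) = 0 := by
        rw [List.countP_eq_zero]
        intro x hx
        have := pv_scanl_lb _ t1
          (by intro c hc; simp only [List.mem_map] at hc
              obtain ⟨w', _, rfl⟩ := hc
              have : (0 : Int) ≤ ((PySem.Str.split₀ w').length : Int) := Int.natCast_nonneg _
              omega) x hx
        simp only [decide_eq_true_eq]
        omega
      simp only [if_pos hgt, hz, List.take_zero]
    · rw [pv_scanl_cons_self t1, List.countP_cons_of_pos (by simp; omega)]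
      simp only [if_neg hgt, List.take_succ_cons]
      rw [ih t1]

-- ===== VERDICT (by name: the statement is the Claim_ definition above) =====
theorem trim_prompt_py_spec : Claim_equal_trim_prompt_py := by
  intro prompt max_tokens _
  unfold Spec_trim_prompt_py trim_prompt_py trim_prompt_py_alt
  rw [pv_loop_eq_take]
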